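-- pv_equiv track=rewrite | github.com/jianyuan/advent-of-code | 2021/python/aoc2021/day13.py | part_2
-- ===== SOURCE A (Python) =====
-- def calculate_dots(
--     dots: set[tuple[int, int]],
--     folds: list[tuple[str, int]],
--     *,
--     return_first: bool = False,
-- ) -> set[tuple[int, int]]:
--     x_size = max(x for x, _ in dots) + 1
--     y_size = max(y for _, y in dots) + 1
--
--     for axis, value in folds:
--         new_dots: set[tuple[int, int]] = set()
--
--         if axis == "y":
--             for x, y in dots:
--                 if y > value:
--                     new_dots.add((x, y_size - 1 - y))
--                 else:
--                     new_dots.add((x, y))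
--             y_size = value
--         else:
--             for x, y in dots:
--                 if x > value:
--                     new_dots.add((x_size - 1 - x, y))
--                 else:
--                     new_dots.add((x, y))
--             x_size = value
--
--         dots = new_dots
--
--         if return_first:
--             break
--
--     return dots
--
-- def part_2(dots: set[tuple[int, int]], folds: list[tuple[str, int]]) -> str:
--     final_dots = calculate_dots(dots, folds)
--     x_size = max(x for x, _ in final_dots) + 1
--     y_size = max(y for _, y in final_dots) + 1
--
--     return "\n".join(
--         "".join("#" if (x, y) in final_dots else "." for x in range(x_size))
--         for y in range(y_size)
--     )
-- ===== SOURCE B (Python) =====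
-- def part_2(dots, folds):
--     x_size = max(x for x, _ in dots) + 1
--     y_size = max(y for _, y in dots) + 1
--
--     # Precompute the size schedule: for each fold, the size of the folded
--     # axis in effect at that step (sizes depend only on the folds).
--     schedule = []
--     for axis, value in folds:
--         if axis == "y":
--             schedule.append((axis, value, y_size))
--             y_size = value
--         else:
--             schedule.append((axis, value, x_size))
--             x_size = value
--
--     # Thread every dot through all folds in one pass.
--     final = set()
--     for x, y in dots:
--         for axis, value, size in schedule:
--             if axis == "y":
--                 if y > value:
--                     y = size - 1 - y
--             else:
--                 if x > value:
--                     x = size - 1 - x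
--         final.add((x, y))
--
--     # Render by stamping '#' into a pre-allocated grid.
--     w = max(x for x, _ in final) + 1
--     h = max(y for _, y in final) + 1
--     grid = [['.'] * w for _ in range(h)]
--     for x, y in final:
--         if 0 <= x and 0 <= y:  # off-canvas dots are never drawn
--             grid[y][x] = '#'
--     return "\n".join("".join(row) for row in grid)
-- ===== Notes on version B (the rewrite author's own statement) =====
-- stated objective: faster
-- what changed: B precomputes the per-fold size schedule once, threads each dot through all folds in a single pass instead of rebuilding the whole dot set once per fold, and renders by stamping '#' into a pre-allocated grid instead of a set-membership test per cell.
import Mathlib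
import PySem

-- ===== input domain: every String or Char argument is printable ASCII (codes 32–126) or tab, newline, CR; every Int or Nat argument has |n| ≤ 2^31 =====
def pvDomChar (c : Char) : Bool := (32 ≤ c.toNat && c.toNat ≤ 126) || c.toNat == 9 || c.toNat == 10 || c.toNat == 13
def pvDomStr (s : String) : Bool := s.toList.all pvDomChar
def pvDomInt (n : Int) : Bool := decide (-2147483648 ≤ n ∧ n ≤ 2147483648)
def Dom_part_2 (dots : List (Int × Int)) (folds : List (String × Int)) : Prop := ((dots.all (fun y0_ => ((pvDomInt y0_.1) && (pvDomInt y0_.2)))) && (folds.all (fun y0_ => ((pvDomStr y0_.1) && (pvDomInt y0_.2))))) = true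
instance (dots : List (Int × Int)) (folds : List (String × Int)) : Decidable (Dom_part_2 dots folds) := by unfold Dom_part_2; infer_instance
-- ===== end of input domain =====

-- B restructures A: it precomputes the per-fold size schedule once, threads each dot
-- through all folds in a single pass, and renders by stamping '#' into a pre-allocated
-- grid instead of a membership test per cell (objective: alternative decomposition;
-- equivalence of the RETURN value is what is proved).

-- ===== PORT A =====
-- the 'for axis, value in folds' loop of calculate_dots (return_first threads the 'break')
def pvCalcLoop (dots : PySem.Set (Int × Int)) (x_size y_size : Int) (return_first : Bool) :
    List (String × Int) → PySem.Set (Int × Int)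
  | [] => dots
  | (axis, value) :: rest =>
    if axis == "y" then
      let new_dots := dots.foldl
        (fun nd p => PySem.Set.add nd (if p.2 > value then (p.1, y_size - 1 - p.2) else p))
        PySem.Set.empty
      if return_first then new_dots else pvCalcLoop new_dots x_size value return_first rest
    else
      let new_dots := dots.foldl
        (fun nd p => PySem.Set.add nd (if p.1 > value then (x_size - 1 - p.1, p.2) else p))
        PySem.Set.empty
      if return_first then new_dots else pvCalcLoop new_dots value y_size return_first rest

-- none = ValueError from max() on an empty set (excluded by Pre_part_2)
def calculate_dots (dots : PySem.Set (Int × Int)) (folds : List (String × Int))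
    (return_first : Bool) : Option (PySem.Set (Int × Int)) :=
  match PySem.List.max? (dots.map Prod.fst) (fun v => v),
        PySem.List.max? (dots.map Prod.snd) (fun v => v) with
  | some mx, some my => some (pvCalcLoop dots (mx + 1) (my + 1) return_first folds)
  | _, _ => none

def part_2 (dots : List (Int × Int)) (folds : List (String × Int)) : String :=
  match calculate_dots dots folds false with
  | none => ""  -- unreachable under Pre_part_2 (Python raises ValueError)
  | some final_dots =>
    match PySem.List.max? (final_dots.map Prod.fst) (fun v => v),
          PySem.List.max? (final_dots.map Prod.snd) (fun v => v) with
    | some mx, some my =>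
      PySem.Str.join "\n" ((PySem.List.pyRange 0 (my + 1) 1).map (fun y =>
        PySem.Str.join "" ((PySem.List.pyRange 0 (mx + 1) 1).map (fun x =>
          if PySem.Set.contains final_dots (x, y) then "#" else "."))))
    | _, _ => ""  -- unreachable: final_dots is nonempty whenever dots is

-- ===== PORT B =====
-- the size schedule: (axis, value, size of the folded axis at that step)
def pvSchedule (x_size y_size : Int) : List (String × Int) → List (String × Int × Int)
  | [] => []
  | (axis, value) :: rest =>
    if axis == "y" then (axis, value, y_size) :: pvSchedule x_size value rest
    else (axis, value, x_size) :: pvSchedule value y_size rest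

-- thread one dot through the whole schedule
def pvThread (p : Int × Int) (sched : List (String × Int × Int)) : Int × Int :=
  sched.foldl (fun q s =>
    if s.1 == "y" then (if q.2 > s.2.1 then (q.1, s.2.2 - 1 - q.2) else q)
    else (if q.1 > s.2.1 then (s.2.2 - 1 - q.1, q.2) else q)) p

-- stamp '#' at one dot (off-canvas dots are never drawn)
def pvStamp (grid : List (List String)) (p : Int × Int) : List (List String) :=
  if 0 ≤ p.1 ∧ 0 ≤ p.2 then
    PySem.List.pySetD grid p.2 (PySem.List.pySetD (PySem.List.pyGetD grid p.2 []) p.1 "#")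
  else grid

def part_2_alt (dots : List (Int × Int)) (folds : List (String × Int)) : String :=
  match PySem.List.max? (dots.map Prod.fst) (fun v => v),
        PySem.List.max? (dots.map Prod.snd) (fun v => v) with
  | some mx0, some my0 =>
    let sched := pvSchedule (mx0 + 1) (my0 + 1) folds
    let final := dots.foldl (fun s p => PySem.Set.add s (pvThread p sched)) PySem.Set.empty
    match PySem.List.max? (final.map Prod.fst) (fun v => v),
          PySem.List.max? (final.map Prod.snd) (fun v => v) with
    | some mx, some my =>
      let grid0 := List.replicate (my + 1).toNat (List.replicate (mx + 1).toNat ".")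
      let grid := final.foldl pvStamp grid0
      PySem.Str.join "\n" (grid.map (fun row => PySem.Str.join "" row))
    | _, _ => ""  -- unreachable: final is nonempty whenever dots is
  | _, _ => ""  -- unreachable under Pre_part_2

-- ===== PRECONDITION & SPEC =====
-- Pre_ excludes only the empty dot set, on which Python A raises ValueError (max() of empty).
def Pre_part_2 (dots : List (Int × Int)) (folds : List (String × Int)) : Prop := dots ≠ []
instance (dots : List (Int × Int)) (folds : List (String × Int)) : Decidable (Pre_part_2 dots folds) := by unfold Pre_part_2; infer_instance

def pvWitness_part_2 : (List (Int × Int)) × (List (String × Int)) :=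
  ([(0, 0), (2, 1), (4, 0)], [("x", 2), ("y", 1)])

def Spec_part_2 (dots : List (Int × Int)) (folds : List (String × Int)) (out : String) : Prop := out = part_2_alt dots folds
instance (dots : List (Int × Int)) (folds : List (String × Int)) (out : String) : Decidable (Spec_part_2 dots folds out) := by unfold Spec_part_2; infer_instance

-- ===== CLAIM (what is proved, stated in full; the proofs are below) =====
def Claim_equal_part_2 : Prop := ∀ (dots : List (Int × Int)) (folds : List (String × Int)), Dom_part_2 dots folds → Pre_part_2 dots folds → Spec_part_2 dots folds (part_2 dots folds)

-- ===== LEMMAS AND PROOFS =====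

-- membership in A's fold loop = threading through B's schedule
lemma calcLoop_mem (folds : List (String × Int)) :
    ∀ (s : PySem.Set (Int × Int)) (xs ys : Int) (q : Int × Int),
      q ∈ pvCalcLoop s xs ys false folds ↔
        ∃ p ∈ s, q = pvThread p (pvSchedule xs ys folds) := by
  induction folds with
  | nil =>
    intro s xs ys q
    simp [pvCalcLoop, pvSchedule, pvThread]
  | cons f rest ih =>
    intro s xs ys q
    obtain ⟨axis, value⟩ := f
    by_cases hax : axis == "y"
    · simp only [pvCalcLoop, pvSchedule, hax, if_pos, Bool.false_eq_true, if_false]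
      rw [ih]
      constructor
      · rintro ⟨p', hp', rfl⟩
        rw [PySem.Set.mem_foldl_add] at hp'
        rcases hp' with h | ⟨p, hp, rfl⟩
        · simp [PySem.Set.empty] at h
        · exact ⟨p, hp, by simp [pvThread, List.foldl, hax]⟩
      · rintro ⟨p, hp, rfl⟩
        refine ⟨if p.2 > value then (p.1, ys - 1 - p.2) else p, ?_, ?_⟩
        · rw [PySem.Set.mem_foldl_add]; exact Or.inr ⟨p, hp, rfl⟩
        · simp [pvThread, List.foldl, hax]
    · simp only [pvCalcLoop, pvSchedule, hax, Bool.false_eq_true, if_false]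
      rw [ih]
      constructor
      · rintro ⟨p', hp', rfl⟩
        rw [PySem.Set.mem_foldl_add] at hp'
        rcases hp' with h | ⟨p, hp, rfl⟩
        · simp [PySem.Set.empty] at h
        · exact ⟨p, hp, by simp [pvThread, List.foldl, hax]⟩
      · rintro ⟨p, hp, rfl⟩
        refine ⟨if p.1 > value then (xs - 1 - p.1, p.2) else p, ?_, ?_⟩
        · rw [PySem.Set.mem_foldl_add]; exact Or.inr ⟨p, hp, rfl⟩
        · simp [pvThread, List.foldl, hax]

-- same membership → same max? value (identity key, Int)
lemma max?_id_eq_of_mem_iff (l₁ l₂ : List Int) (h : ∀ v, v ∈ l₁ ↔ v ∈ l₂) :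
    PySem.List.max? l₁ (fun v => v) = PySem.List.max? l₂ (fun v => v) := by
  match h₁ : PySem.List.max? l₁ (fun v => v), h₂ : PySem.List.max? l₂ (fun v => v) with
  | none, none => rfl
  | none, some m₂ =>
    rw [PySem.List.max?_eq_none_iff] at h₁
    have := PySem.List.max?_mem h₂
    rw [← h] at this; simp [h₁] at this
  | some m₁, none =>
    rw [PySem.List.max?_eq_none_iff] at h₂
    have := PySem.List.max?_mem h₁
    rw [h] at this; simp [h₂] at this
  | some m₁, some m₂ =>
    have hm₁ := PySem.List.max?_mem h₁
    have hm₂ := PySem.List.max?_mem h₂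
    have h12 := PySem.List.max?_isMax h₂ m₁ ((h m₁).1 hm₁)
    have h21 := PySem.List.max?_isMax h₁ m₂ ((h m₂).2 hm₂)
    simp only [Option.some.injEq]
    exact le_antisymm h12 h21

def pvCell (g : List (List String)) (j i : Nat) : String := (g.getD j []).getD i "."

lemma stamp_length (g : List (List String)) (p : Int × Int) :
    (pvStamp g p).length = g.length := by
  unfold pvStamp
  split_ifs with h
  · exact PySem.List.length_pySetD ..
  · rfl

lemma stamp_rows (W : Nat) (g : List (List String)) (p : Int × Int)
    (h : ∀ r ∈ g, r.length = W) : ∀ r ∈ pvStamp g p, r.length = W := by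
  unfold pvStamp
  split_ifs with hg
  · rw [PySem.List.pySetD_of_nonneg _ _ hg.2]
    by_cases hlt : p.2.toNat < g.length
    · intro r hr
      rcases List.mem_or_eq_of_mem_set hr with h' | rfl
      · exact h r h'
      · rw [PySem.List.pyGetD_of_nonneg _ _ hg.2, PySem.List.pySetD_of_nonneg _ _ hg.1,
          List.length_set, List.getD_eq_getElem _ _ hlt]
        exact h _ (List.getElem_mem hlt)
    · rw [List.set_eq_of_length_le (Nat.le_of_not_lt hlt)]
      exact h
  · exact h

lemma stamp_cell (W : Nat) (g : List (List String)) (p : Int × Int) (j i : Nat)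
    (hrows : ∀ r ∈ g, r.length = W) (hj : j < g.length) (hi : i < W) :
    pvCell (pvStamp g p) j i = if p = ((i : Int), (j : Int)) then "#" else pvCell g j i := by
  obtain ⟨x, y⟩ := p
  unfold pvStamp pvCell
  split_ifs with hg heq heq2
  · replace hg : 0 ≤ x ∧ 0 ≤ y := hg
    obtain ⟨hx, hy⟩ : x = (i : Int) ∧ y = (j : Int) := by simpa [Prod.ext_iff] using heq
    subst hx; subst hy
    rw [PySem.List.pySetD_of_nonneg _ _ hg.2, PySem.List.pyGetD_of_nonneg _ _ hg.2,
      PySem.List.pySetD_of_nonneg _ _ hg.1]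
    simp only [Int.toNat_natCast]
    have h1 : (g.set j ((g.getD j []).set i "#")).getD j [] = (g.getD j []).set i "#" := by
      rw [List.getD_eq_getElem?_getD, List.getElem?_set_self hj]; rfl
    rw [h1]
    have hiw : i < (g.getD j []).length := by
      rw [List.getD_eq_getElem _ _ hj]; exact (hrows _ (List.getElem_mem hj)) ▸ hi
    rw [List.getD_eq_getElem?_getD, List.getElem?_set_self hiw]; rfl
  · replace hg : 0 ≤ x ∧ 0 ≤ y := hg
    rw [PySem.List.pySetD_of_nonneg _ _ hg.2, PySem.List.pyGetD_of_nonneg _ _ hg.2,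
      PySem.List.pySetD_of_nonneg _ _ hg.1]
    by_cases hyj : y.toNat = j
    · have hxi : x.toNat ≠ i := by
        intro hxv
        apply heq
        have h2 := hg.2; have h1 := hg.1
        simp only [Prod.mk.injEq]; constructor <;> omega
      subst hyj
      have h1 : (g.set y.toNat ((g.getD y.toNat []).set x.toNat "#")).getD y.toNat []
          = (g.getD y.toNat []).set x.toNat "#" := by
        rw [List.getD_eq_getElem?_getD, List.getElem?_set_self hj]; rfl
      rw [h1, List.getD_eq_getElem?_getD, List.getElem?_set_ne hxi, ← List.getD_eq_getElem?_getD]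
    · simp [List.getD_eq_getElem?_getD, List.getElem?_set_ne hyj]
  · exfalso
    obtain ⟨hx, hy⟩ : x = (i : Int) ∧ y = (j : Int) := by simpa [Prod.ext_iff] using heq2
    refine hg ⟨?_, ?_⟩ <;> simp [hx, hy]
  · rfl

lemma stamp_foldl_length (S : List (Int × Int)) : ∀ g : List (List String),
    (S.foldl pvStamp g).length = g.length := by
  induction S with
  | nil => intro g; rfl
  | cons p S ih => intro g; rw [List.foldl_cons, ih, stamp_length]

lemma stamp_foldl_rows (W : Nat) (S : List (Int × Int)) : ∀ g : List (List String),
    (∀ r ∈ g, r.length = W) → ∀ r ∈ S.foldl pvStamp g, r.length = W := by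
  induction S with
  | nil => intro g h; exact h
  | cons p S ih => intro g h; exact ih _ (stamp_rows W g p h)

lemma stamp_foldl_cell (W : Nat) (S : List (Int × Int)) : ∀ (g : List (List String)) (j i : Nat),
    (∀ r ∈ g, r.length = W) → j < g.length → i < W →
    pvCell (S.foldl pvStamp g) j i =
      if ((i : Int), (j : Int)) ∈ S then "#" else pvCell g j i := by
  induction S with
  | nil => intro g j i _ _ _; simp
  | cons p S ih =>
    intro g j i hrows hj hi
    rw [List.foldl_cons,
      ih (pvStamp g p) j i (stamp_rows W g p hrows) (by rw [stamp_length]; exact hj) hi,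
      stamp_cell W g p j i hrows hj hi]
    by_cases h1 : ((i : Int), (j : Int)) ∈ S <;> by_cases h2 : p = ((i : Int), (j : Int)) <;>
      simp [h1, h2, eq_comm]

-- ===== VERDICT (by name: the statement is the Claim_ definition above) =====
theorem part_2_spec : Claim_equal_part_2 := by
  intro dots folds _ hpre
  unfold Pre_part_2 at hpre
  unfold Spec_part_2
  -- the maxima over the input exist
  obtain ⟨mx0, hmx0⟩ : ∃ m, PySem.List.max? (dots.map Prod.fst) (fun v => v) = some m := by
    cases h : PySem.List.max? (dots.map Prod.fst) (fun v => v) with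
    | none => rw [PySem.List.max?_eq_none_iff] at h; exact absurd (List.map_eq_nil_iff.mp h) hpre
    | some m => exact ⟨m, rfl⟩
  obtain ⟨my0, hmy0⟩ : ∃ m, PySem.List.max? (dots.map Prod.snd) (fun v => v) = some m := by
    cases h : PySem.List.max? (dots.map Prod.snd) (fun v => v) with
    | none => rw [PySem.List.max?_eq_none_iff] at h; exact absurd (List.map_eq_nil_iff.mp h) hpre
    | some m => exact ⟨m, rfl⟩
  have hcalc : calculate_dots dots folds false
      = some (pvCalcLoop dots (mx0 + 1) (my0 + 1) false folds) := by
    unfold calculate_dots; rw [hmx0, hmy0]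
  -- the two final sets have the same members
  have hmem : ∀ q, q ∈ pvCalcLoop dots (mx0 + 1) (my0 + 1) false folds ↔
      q ∈ dots.foldl
        (fun s p => PySem.Set.add s (pvThread p (pvSchedule (mx0 + 1) (my0 + 1) folds)))
        PySem.Set.empty := by
    intro q
    rw [calcLoop_mem, PySem.Set.mem_foldl_add]
    simp [PySem.Set.empty]
  -- both final sets are nonempty
  obtain ⟨p0, hp0⟩ := List.exists_mem_of_ne_nil dots hpre
  have hAne : pvCalcLoop dots (mx0 + 1) (my0 + 1) false folds ≠ [] :=
    List.ne_nil_of_mem ((calcLoop_mem folds dots _ _ _).mpr ⟨p0, hp0, rfl⟩)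
  obtain ⟨mx, hmxA⟩ : ∃ m, PySem.List.max?
      ((pvCalcLoop dots (mx0 + 1) (my0 + 1) false folds).map Prod.fst) (fun v => v) = some m := by
    cases h : PySem.List.max? ((pvCalcLoop dots (mx0 + 1) (my0 + 1) false folds).map Prod.fst)
        (fun v => v) with
    | none => rw [PySem.List.max?_eq_none_iff] at h; exact absurd (List.map_eq_nil_iff.mp h) hAne
    | some m => exact ⟨m, rfl⟩
  obtain ⟨my, hmyA⟩ : ∃ m, PySem.List.max?
      ((pvCalcLoop dots (mx0 + 1) (my0 + 1) false folds).map Prod.snd) (fun v => v) = some m := by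
    cases h : PySem.List.max? ((pvCalcLoop dots (mx0 + 1) (my0 + 1) false folds).map Prod.snd)
        (fun v => v) with
    | none => rw [PySem.List.max?_eq_none_iff] at h; exact absurd (List.map_eq_nil_iff.mp h) hAne
    | some m => exact ⟨m, rfl⟩
  -- B's maxima agree with A's
  have hmapfst : ∀ v, v ∈ (pvCalcLoop dots (mx0 + 1) (my0 + 1) false folds).map Prod.fst ↔
      v ∈ (dots.foldl
        (fun s p => PySem.Set.add s (pvThread p (pvSchedule (mx0 + 1) (my0 + 1) folds)))
        PySem.Set.empty).map Prod.fst := by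
    intro v
    simp only [List.mem_map]
    exact ⟨fun ⟨q, hq, e⟩ => ⟨q, (hmem q).1 hq, e⟩, fun ⟨q, hq, e⟩ => ⟨q, (hmem q).2 hq, e⟩⟩
  have hmapsnd : ∀ v, v ∈ (pvCalcLoop dots (mx0 + 1) (my0 + 1) false folds).map Prod.snd ↔
      v ∈ (dots.foldl
        (fun s p => PySem.Set.add s (pvThread p (pvSchedule (mx0 + 1) (my0 + 1) folds)))
        PySem.Set.empty).map Prod.snd := by
    intro v
    simp only [List.mem_map]
    exact ⟨fun ⟨q, hq, e⟩ => ⟨q, (hmem q).1 hq, e⟩, fun ⟨q, hq, e⟩ => ⟨q, (hmem q).2 hq, e⟩⟩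
  have hmxB := (max?_id_eq_of_mem_iff _ _ hmapfst).symm.trans hmxA
  have hmyB := (max?_id_eq_of_mem_iff _ _ hmapsnd).symm.trans hmyA
  -- reduce both sides to their rendered strings
  rw [show part_2 dots folds = PySem.Str.join "\n"
      ((PySem.List.pyRange 0 (my + 1) 1).map (fun y =>
        PySem.Str.join "" ((PySem.List.pyRange 0 (mx + 1) 1).map (fun x =>
          if PySem.Set.contains (pvCalcLoop dots (mx0 + 1) (my0 + 1) false folds) (x, y)
          then "#" else ".")))) by
    unfold part_2; rw [hcalc]; simp only; rw [hmxA, hmyA]]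
  rw [show part_2_alt dots folds = PySem.Str.join "\n"
      (((dots.foldl
          (fun s p => PySem.Set.add s (pvThread p (pvSchedule (mx0 + 1) (my0 + 1) folds)))
          PySem.Set.empty).foldl pvStamp
        (List.replicate (my + 1).toNat (List.replicate (mx + 1).toNat "."))).map
        (fun row => PySem.Str.join "" row)) by
    unfold part_2_alt; rw [hmx0, hmy0]; simp only; rw [hmxB, hmyB]]
  congr 1
  simp only [PySem.Set.empty]
  have hrows0 : ∀ r ∈ List.replicate (my + 1).toNat (List.replicate (mx + 1).toNat ("." : String)),
      r.length = (mx + 1).toNat := by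
    intro r hr; rw [List.eq_of_mem_replicate hr]; simp
  have hglen : ((dots.foldl
      (fun s p => PySem.Set.add s (pvThread p (pvSchedule (mx0 + 1) (my0 + 1) folds)))
      ([] : PySem.Set (Int × Int))).foldl pvStamp
      (List.replicate (my + 1).toNat (List.replicate (mx + 1).toNat "."))).length
      = (my + 1).toNat := by
    rw [stamp_foldl_length, List.length_replicate]
  apply List.ext_getElem
  · simp [PySem.List.length_pyRange_one, hglen]
  · intro j hj1 hj2
    rw [List.getElem_map, List.getElem_map, PySem.List.getElem_pyRange_one]
    have hjH : j < (my + 1).toNat := by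
      rw [List.length_map, PySem.List.length_pyRange_one] at hj1; omega
    congr 1
    have hjg : j < ((dots.foldl
        (fun s p => PySem.Set.add s (pvThread p (pvSchedule (mx0 + 1) (my0 + 1) folds)))
        ([] : PySem.Set (Int × Int))).foldl pvStamp
        (List.replicate (my + 1).toNat (List.replicate (mx + 1).toNat "."))).length := by
      rw [hglen]; exact hjH
    have hrowW : (((dots.foldl
        (fun s p => PySem.Set.add s (pvThread p (pvSchedule (mx0 + 1) (my0 + 1) folds)))
        ([] : PySem.Set (Int × Int))).foldl pvStamp
        (List.replicate (my + 1).toNat (List.replicate (mx + 1).toNat ".")))[j]).length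
        = (mx + 1).toNat := by
      exact stamp_foldl_rows _ _ _ hrows0 _ (List.getElem_mem hjg)
    apply List.ext_getElem
    · simp [PySem.List.length_pyRange_one, hrowW]
    · intro i hi1 hi2
      rw [List.getElem_map, PySem.List.getElem_pyRange_one]
      have hiW : i < (mx + 1).toNat := by
        rw [List.length_map, PySem.List.length_pyRange_one] at hi1; omega
      have hcell : (((dots.foldl
          (fun s p => PySem.Set.add s (pvThread p (pvSchedule (mx0 + 1) (my0 + 1) folds)))
          ([] : PySem.Set (Int × Int))).foldl pvStamp
          (List.replicate (my + 1).toNat (List.replicate (mx + 1).toNat ".")))[j])[i]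
          = pvCell ((dots.foldl
          (fun s p => PySem.Set.add s (pvThread p (pvSchedule (mx0 + 1) (my0 + 1) folds)))
          ([] : PySem.Set (Int × Int))).foldl pvStamp
          (List.replicate (my + 1).toNat (List.replicate (mx + 1).toNat "."))) j i := by
        unfold pvCell
        rw [List.getD_eq_getElem _ _ hjg, List.getD_eq_getElem]
      rw [hcell, stamp_foldl_cell (mx + 1).toNat _ _ j i hrows0 (by simpa using hjH) hiW]
      have hdot : pvCell (List.replicate (my + 1).toNat (List.replicate (mx + 1).toNat ".")) j i
          = "." := by
        unfold pvCell
        rw [List.getD_replicate _ (show j < (my + 1).toNat from hjH),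
          List.getD_replicate _ hiW]
      rw [hdot]
      have hcast : ((0 : Int) + (i : Int), (0 : Int) + (j : Int)) = ((i : Int), (j : Int)) := by
        simp
      rw [hcast]
      by_cases hq : ((i : Int), (j : Int)) ∈ dots.foldl
          (fun s p => PySem.Set.add s (pvThread p (pvSchedule (mx0 + 1) (my0 + 1) folds)))
          ([] : PySem.Set (Int × Int))
      · rw [if_pos hq, if_pos]
        rw [show (PySem.Set.contains (pvCalcLoop dots (mx0 + 1) (my0 + 1) false folds)
          ((i : Int), (j : Int))) = true from (PySem.Set.contains_iff _ _).mpr ((hmem _).mpr hq)]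
      · rw [if_neg hq, if_neg]
        intro hc
        exact hq ((hmem _).1 ((PySem.Set.contains_iff _ _).mp (by exact_mod_cast hc)))
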